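-- pv_equiv track=rewrite | github.com/daxis-io/arco | python/arco/src/arco_flow/types/partition.py | _is_valid_dimension_key
-- ===== SOURCE A (Python) =====
-- def _is_valid_dimension_key(key: str) -> bool:
--     if not key:
--         return False
--     first = key[0]
--     if not ("a" <= first <= "z"):
--         return False
--     for c in key[1:]:
--         if not ("a" <= c <= "z" or "0" <= c <= "9" or c == "_"):
--             return False
--     return True
-- ===== SOURCE B (Python) =====
-- import re
--
-- _KEY_RE = re.compile(r"[a-z][a-z0-9_]*")
--
--
-- def _is_valid_dimension_key(key: str) -> bool:
--     return _KEY_RE.fullmatch(key) is not None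
-- ===== Notes on version B (the rewrite author's own statement) =====
-- stated objective: idiomatic
-- what changed: Replaces the explicit first-char check and per-character loop by a single anchored regular-expression fullmatch against [a-z][a-z0-9_]* (ported to Lean as the equivalent three-state DFA run over the string); the C regex engine removes the Python-level loop.
import Mathlib
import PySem

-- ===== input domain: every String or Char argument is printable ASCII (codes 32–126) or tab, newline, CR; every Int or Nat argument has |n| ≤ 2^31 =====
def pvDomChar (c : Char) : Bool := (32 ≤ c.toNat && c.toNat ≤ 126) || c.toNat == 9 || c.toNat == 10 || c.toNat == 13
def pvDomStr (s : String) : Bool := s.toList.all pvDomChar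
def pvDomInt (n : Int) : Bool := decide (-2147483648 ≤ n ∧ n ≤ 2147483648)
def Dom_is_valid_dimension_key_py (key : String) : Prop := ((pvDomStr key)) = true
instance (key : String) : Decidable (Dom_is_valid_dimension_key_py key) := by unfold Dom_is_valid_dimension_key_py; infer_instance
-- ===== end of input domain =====

-- B replaces A's explicit first-char test plus per-character loop by one anchored regex
-- fullmatch; the Lean port runs the equivalent three-state DFA of that regex (idiomatic).

-- ===== PORT A =====
def is_valid_dimension_key_py (key : String) : Bool :=
  match key.toList with
  | [] => false                                   -- if not key: return False
  | first :: rest =>                              -- first = key[0]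
    if !('a' ≤ first && first ≤ 'z') then false   -- if not ("a" <= first <= "z"): return False
    else rest.all fun c =>                        -- for c in key[1:] (early return False = .all)
      ('a' ≤ c && c ≤ 'z') || ('0' ≤ c && c ≤ '9') || c == '_'

-- ===== PORT B =====
-- Source B calls re.fullmatch(r"[a-z][a-z0-9_]*", key); Lean has no regex engine, so the call is
-- ported EXACTLY as the canonical DFA of that regex: state 0 = start (expects [a-z]),
-- state 1 = accepting (expects [a-z0-9_]), state 2 = dead sink; fullmatch succeeds iff the
-- run over all characters ends in the accepting state. This is exact on all strings.
def pvStep (s : Nat) (c : Char) : Nat :=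
  match s with
  | 0 => if 'a' ≤ c && c ≤ 'z' then 1 else 2
  | 1 => if ('a' ≤ c && c ≤ 'z') || ('0' ≤ c && c ≤ '9') || c == '_' then 1 else 2
  | _ => 2

def is_valid_dimension_key_py_alt (key : String) : Bool :=
  key.toList.foldl pvStep 0 == 1

-- ===== PRECONDITION & SPEC =====
def Spec_is_valid_dimension_key_py (key : String) (out : Bool) : Prop := out = is_valid_dimension_key_py_alt key
instance (key : String) (out : Bool) : Decidable (Spec_is_valid_dimension_key_py key out) := by unfold Spec_is_valid_dimension_key_py; infer_instance

-- ===== CLAIM (what is proved, stated in full; the proofs are below) =====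
def Claim_equal_is_valid_dimension_key_py : Prop := ∀ (key : String), Dom_is_valid_dimension_key_py key → Spec_is_valid_dimension_key_py key (is_valid_dimension_key_py key)

-- ===== LEMMAS AND PROOFS =====

-- the dead state 2 is absorbing
theorem pvStep_dead (l : List Char) : l.foldl pvStep 2 = 2 := by
  induction l with
  | nil => rfl
  | cons c l ih => simpa [pvStep] using ih

-- from the accepting state, the run stays accepting iff every remaining char is allowed
theorem pvStep_run (l : List Char) :
    (l.foldl pvStep 1 == 1) =
      l.all (fun c => ('a' ≤ c && c ≤ 'z') || ('0' ≤ c && c ≤ '9') || c == '_') := by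
  induction l with
  | nil => rfl
  | cons c l ih =>
    by_cases h : (('a' ≤ c && c ≤ 'z') || ('0' ≤ c && c ≤ '9') || c == '_') = true
    · simp [pvStep, h, ih]
    · simp [pvStep, h, pvStep_dead]

-- ===== VERDICT (by name: the statement is the Claim_ definition above) =====
theorem is_valid_dimension_key_py_spec : Claim_equal_is_valid_dimension_key_py := by
  intro key _
  unfold Spec_is_valid_dimension_key_py is_valid_dimension_key_py is_valid_dimension_key_py_alt
  cases hk : key.toList with
  | nil => rfl
  | cons first rest =>
    simp only [List.foldl]
    by_cases h : ('a' ≤ first && first ≤ 'z') = true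
    · simp [pvStep, h, pvStep_run]
    · simp [pvStep, h, pvStep_dead]
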